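-- pv_equiv track=rewrite | github.com/mossjm/ell-reports | build.py | strip_existing_toc
-- ===== SOURCE A (Python) =====
-- def strip_existing_toc(md_content):
--     """Remove the existing Table of Contents section from markdown."""
--     lines = md_content.split('\n')
--     result = []
--     in_toc = False
--     for line in lines:
--         if line.strip().startswith('## Table of Contents'):
--             in_toc = True
--             continue
--         if in_toc:
--             if line.strip().startswith('## ') or (line.strip().startswith('#') and not line.strip().startswith('##')):
--                 in_toc = False
--                 result.append(line)
--             elif line.strip() == '---':
--                 in_toc = False
--                 continue
--             continue
--         result.append(line)
--     return '\n'.join(result)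
-- ===== SOURCE B (Python) =====
-- def strip_existing_toc(md_content):
--     """Remove the existing Table of Contents section from markdown."""
--     lines = md_content.split('\n')
--
--     def classify(line):
--         s = line.strip()
--         if s.startswith('## Table of Contents'):
--             return 0  # TOC header
--         if s.startswith('## ') or (s.startswith('#') and not s.startswith('##')):
--             return 1  # heading boundary (kept)
--         if s == '---':
--             return 2  # horizontal-rule boundary (dropped)
--         return 3  # ordinary line
--
--     # pass 1: category code per line
--     cats = [classify(l) for l in lines]
--     n = len(cats)
--
--     # pass 2: half-open index spans [a, b) covering the TOC blocks
--     spans = []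
--     i = 0
--     while i < n:
--         if cats[i] == 0:
--             j = i + 1
--             while j < n and cats[j] != 1 and cats[j] != 2:
--                 j += 1
--             end = j + 1 if j < n and cats[j] == 2 else j
--             spans.append((i, end))
--             i = end
--         else:
--             i += 1
--
--     # pass 3: keep the lines whose index lies in no TOC span
--     def in_toc_span(k):
--         return any(a <= k < b for a, b in spans)
--
--     return '\n'.join(line for k, line in enumerate(lines) if not in_toc_span(k))
-- ===== Notes on version B (the rewrite author's own statement) =====
-- stated objective: alternative
-- what changed: Replaces A's single stateful scan with a carried in_toc boolean by a staged three-pass pipeline: classify every line into a 4-way category code, compute the half-open index spans of the TOC blocks from the category array alone, then keep exactly the lines whose index lies in no span.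
import Mathlib
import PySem

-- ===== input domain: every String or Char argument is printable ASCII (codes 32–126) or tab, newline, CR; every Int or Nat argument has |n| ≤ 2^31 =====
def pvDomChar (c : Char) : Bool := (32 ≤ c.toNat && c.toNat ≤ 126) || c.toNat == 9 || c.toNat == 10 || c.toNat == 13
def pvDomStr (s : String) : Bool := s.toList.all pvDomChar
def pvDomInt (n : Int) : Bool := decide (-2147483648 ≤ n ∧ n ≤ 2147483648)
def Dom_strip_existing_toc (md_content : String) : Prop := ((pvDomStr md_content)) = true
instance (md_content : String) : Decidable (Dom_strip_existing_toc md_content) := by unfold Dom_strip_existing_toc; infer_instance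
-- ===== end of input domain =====

-- B replaces A's single stateful scan (a boolean in_toc flag carried across the loop) by a
-- staged pipeline: classify every line into a 4-way category code, compute the half-open
-- index spans of the TOC blocks from the code array, then keep the lines whose index lies
-- in no span ('alternative' decomposition; same linear cost, same return value).

-- ===== PORT A =====
-- one step of A's for-loop: state = (result, in_toc); lines handled as List Char
def stripTocStepA (st : List (List Char) × Bool) (line : List Char) : List (List Char) × Bool :=
  if PySem.Chars.startswith (PySem.Chars.strip line) "## Table of Contents".toList then
    (st.1, true)
  else if st.2 then
    if PySem.Chars.startswith (PySem.Chars.strip line) "## ".toList ||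
       (PySem.Chars.startswith (PySem.Chars.strip line) "#".toList &&
        !PySem.Chars.startswith (PySem.Chars.strip line) "##".toList) then
      (st.1 ++ [line], false)
    else if PySem.Chars.strip line == "---".toList then
      (st.1, false)
    else
      (st.1, true)
  else
    (st.1 ++ [line], st.2)

def strip_existing_toc (md_content : String) : String :=
  let lines := PySem.Chars.splitOn md_content.toList ['\n']
  String.ofList (PySem.Chars.join ['\n'] (lines.foldl stripTocStepA ([], false)).1)

-- ===== PORT B =====
-- pass 1: the category code of one line (0 = TOC header, 1 = heading boundary, 2 = '---', 3 = other)
def classifyB (line : List Char) : Nat :=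
  if PySem.Chars.startswith (PySem.Chars.strip line) "## Table of Contents".toList then 0
  else if PySem.Chars.startswith (PySem.Chars.strip line) "## ".toList ||
          (PySem.Chars.startswith (PySem.Chars.strip line) "#".toList &&
           !PySem.Chars.startswith (PySem.Chars.strip line) "##".toList) then 1
  else if PySem.Chars.strip line == "---".toList then 2
  else 3

-- Source B's inner while-loop: from index j with the category suffix, return the exclusive end
-- of the current TOC span and the category suffix the outer loop resumes at
def scanB (j : Nat) : List Nat → Nat × List Nat
  | [] => (j, [])
  | c :: cs =>
    if c == 1 then (j, c :: cs)
    else if c == 2 then (j + 1, cs)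
    else scanB (j + 1) cs

theorem scanB_len (l : List Nat) : ∀ j : Nat, (scanB j l).2.length ≤ l.length := by
  induction l with
  | nil => intro j; simp [scanB]
  | cons c cs ih =>
    intro j
    simp only [scanB]
    split_ifs with h1 h2
    · simp
    · simp
    · exact Nat.le_trans (ih (j + 1)) (Nat.le_succ _)

-- pass 2 (Source B's outer while-loop): the half-open index spans [a, b) of the TOC blocks
def spansB (i : Nat) : List Nat → List (Nat × Nat)
  | [] => []
  | c :: cs =>
    if c == 0 then
      (i, (scanB (i + 1) cs).1) :: spansB (scanB (i + 1) cs).1 (scanB (i + 1) cs).2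
    else
      spansB (i + 1) cs
termination_by l => l.length
decreasing_by
  · exact Nat.lt_succ_of_le (scanB_len cs (i + 1))
  · simp

-- pass 3: the filtering join-comprehension (enumerate index k, keep if no span covers k)
def filterB (spans : List (Nat × Nat)) : Nat → List (List Char) → List (List Char)
  | _, [] => []
  | k, l :: rest =>
    if spans.any (fun p => decide (p.1 ≤ k ∧ k < p.2)) then
      filterB spans (k + 1) rest
    else
      l :: filterB spans (k + 1) rest

def strip_existing_toc_alt (md_content : String) : String :=
  let lines := PySem.Chars.splitOn md_content.toList ['\n']
  let cats := lines.map classifyB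
  String.ofList (PySem.Chars.join ['\n'] (filterB (spansB 0 cats) 0 lines))

-- ===== PRECONDITION & SPEC =====
def Spec_strip_existing_toc (md_content : String) (out : String) : Prop := out = strip_existing_toc_alt md_content
instance (md_content : String) (out : String) : Decidable (Spec_strip_existing_toc md_content out) := by unfold Spec_strip_existing_toc; infer_instance

-- ===== CLAIM (what is proved, stated in full; the proofs are below) =====
def Claim_equal_strip_existing_toc : Prop := ∀ (md_content : String), Dom_strip_existing_toc md_content → Spec_strip_existing_toc md_content (strip_existing_toc md_content)

-- ===== LEMMAS AND PROOFS =====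

-- common reference point: the result described as mutual recursion over the category codes
mutual
def specOuter : List (List Char) → List (List Char)
  | [] => []
  | l :: rest => if classifyB l == 0 then specInner rest else l :: specOuter rest

def specInner : List (List Char) → List (List Char)
  | [] => []
  | l :: rest =>
    if classifyB l == 0 then specInner rest
    else if classifyB l == 1 then l :: specOuter rest
    else if classifyB l == 2 then specOuter rest
    else specInner rest
end

theorem classifyB_cases (l : List Char) :
    classifyB l = 0 ∨ classifyB l = 1 ∨ classifyB l = 2 ∨ classifyB l = 3 := by
  unfold classifyB
  split_ifs <;> simp

-- ----- A = spec -----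
theorem foldA_eq_spec (lines : List (List Char)) : ∀ acc : List (List Char),
    (lines.foldl stripTocStepA (acc, false)).1 = acc ++ specOuter lines ∧
    (lines.foldl stripTocStepA (acc, true)).1 = acc ++ specInner lines := by
  induction lines with
  | nil => simp [specOuter, specInner]
  | cons line rest ih =>
    intro acc
    by_cases h : PySem.Chars.startswith (PySem.Chars.strip line) "## Table of Contents".toList = true
    · have hc : classifyB line = 0 := by simp only [classifyB]; rw [if_pos h]
      constructor
      · rw [List.foldl_cons]
        simp only [stripTocStepA, h, if_pos]
        rw [(ih acc).2]
        simp [specOuter, hc]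
      · rw [List.foldl_cons]
        simp only [stripTocStepA, h, if_pos]
        rw [(ih acc).2]
        simp [specInner, hc]
    · by_cases hb : (PySem.Chars.startswith (PySem.Chars.strip line) "## ".toList ||
          (PySem.Chars.startswith (PySem.Chars.strip line) "#".toList &&
           !PySem.Chars.startswith (PySem.Chars.strip line) "##".toList)) = true
      · have hc : classifyB line = 1 := by simp only [classifyB]; rw [if_neg h, if_pos hb]
        constructor
        · rw [List.foldl_cons]
          simp only [stripTocStepA]
          rw [if_neg h, if_neg Bool.false_ne_true]
          rw [(ih (acc ++ [line])).1]
          simp [specOuter, hc]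
        · rw [List.foldl_cons]
          simp only [stripTocStepA]
          rw [if_neg h, if_pos trivial, if_pos hb]
          rw [(ih (acc ++ [line])).1]
          simp [specInner, hc]
      · by_cases hd : (PySem.Chars.strip line == "---".toList) = true
        · have hc : classifyB line = 2 := by
            simp only [classifyB]; rw [if_neg h, if_neg hb, if_pos hd]
          constructor
          · rw [List.foldl_cons]
            simp only [stripTocStepA]
            rw [if_neg h, if_neg Bool.false_ne_true]
            rw [(ih (acc ++ [line])).1]
            simp [specOuter, hc]
          · rw [List.foldl_cons]
            simp only [stripTocStepA]
            rw [if_neg h, if_pos trivial, if_neg hb, if_pos hd]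
            rw [(ih acc).1]
            simp [specInner, hc]
        · have hc : classifyB line = 3 := by
            simp only [classifyB]; rw [if_neg h, if_neg hb, if_neg hd]
          constructor
          · rw [List.foldl_cons]
            simp only [stripTocStepA]
            rw [if_neg h, if_neg Bool.false_ne_true]
            rw [(ih (acc ++ [line])).1]
            simp [specOuter, hc]
          · rw [List.foldl_cons]
            simp only [stripTocStepA]
            rw [if_neg h, if_pos trivial, if_neg hb, if_neg hd]
            rw [(ih acc).2]
            simp [specInner, hc]

-- ----- B = spec -----
theorem scanB_ge (l : List Nat) : ∀ j : Nat, j ≤ (scanB j l).1 := by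
  induction l with
  | nil => intro j; simp [scanB]
  | cons c cs ih =>
    intro j
    simp only [scanB]
    split_ifs with h1 h2
    · simp
    · simp
    · exact Nat.le_trans (Nat.le_succ _) (ih (j + 1))

theorem spansB_lb_aux : ∀ n (l : List Nat), l.length ≤ n →
    ∀ (i : Nat) (p : Nat × Nat), p ∈ spansB i l → i ≤ p.1 := by
  intro n
  induction n with
  | zero =>
    intro l hl i p hp
    have : l = [] := List.eq_nil_of_length_eq_zero (Nat.le_zero.mp hl)
    subst this; simp [spansB] at hp
  | succ n ih =>
    intro l hl i p hp
    match l with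
    | [] => simp [spansB] at hp
    | c :: cs =>
      simp only [spansB] at hp
      by_cases hc : (c == 0) = true
      · rw [if_pos hc] at hp
        rcases List.mem_cons.mp hp with h | h
        · subst h; exact Nat.le_refl i
        · have h2 : (scanB (i + 1) cs).1 ≤ p.1 :=
            ih _ (Nat.le_trans (scanB_len cs (i + 1)) (Nat.le_of_succ_le_succ hl)) _ _ h
          have h3 : i + 1 ≤ (scanB (i + 1) cs).1 := scanB_ge cs (i + 1)
          omega
      · rw [if_neg hc] at hp
        have := ih cs (Nat.le_of_succ_le_succ hl) (i + 1) p hp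
        omega

theorem spansB_lb {l : List Nat} {i : Nat} {p : Nat × Nat} (hp : p ∈ spansB i l) : i ≤ p.1 :=
  spansB_lb_aux l.length l (Nat.le_refl _) i p hp

theorem any_cov_false {S : List (Nat × Nat)} {k : Nat} (h : ∀ p ∈ S, k < p.1) :
    S.any (fun p => decide (p.1 ≤ k ∧ k < p.2)) = false := by
  rw [List.any_eq_false]
  intro p hp
  have := h p hp
  simp; omega

theorem filterB_dead (l : List (List Char)) : ∀ (S : List (Nat × Nat)) (a b k : Nat), b ≤ k →
    filterB ((a, b) :: S) k l = filterB S k l := by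
  induction l with
  | nil => intro S a b k h; simp [filterB]
  | cons x rest ih =>
    intro S a b k h
    have hd : (decide (a ≤ k ∧ k < b)) = false := by simp; omega
    simp only [filterB, List.any_cons, hd, Bool.false_or]
    by_cases hc : S.any (fun p => decide (p.1 ≤ k ∧ k < p.2)) = true
    · rw [if_pos hc, if_pos hc, ih S a b (k + 1) (Nat.le_trans h (Nat.le_succ _))]
    · rw [if_neg hc, if_neg hc, ih S a b (k + 1) (Nat.le_trans h (Nat.le_succ _))]

theorem mainB_aux : ∀ n : Nat,
    (∀ lines : List (List Char), lines.length ≤ n → ∀ i : Nat,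
      filterB (spansB i (lines.map classifyB)) i lines = specOuter lines) ∧
    (∀ lines : List (List Char), lines.length ≤ n → ∀ a j : Nat, a ≤ j →
      filterB ((a, (scanB j (lines.map classifyB)).1) ::
               spansB (scanB j (lines.map classifyB)).1 (scanB j (lines.map classifyB)).2)
        j lines = specInner lines) := by
  intro n
  induction n with
  | zero =>
    constructor
    · intro lines hl i
      have h0 : lines = [] := List.eq_nil_of_length_eq_zero (Nat.le_zero.mp hl)
      subst h0; simp [filterB, specOuter]
    · intro lines hl a j ha
      have h0 : lines = [] := List.eq_nil_of_length_eq_zero (Nat.le_zero.mp hl)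
      subst h0; simp [scanB, filterB, specInner]
  | succ n ih =>
    constructor
    · -- outer loop: copy normal lines, open a span on a TOC header
      intro lines hl i
      match lines with
      | [] => simp [filterB, specOuter]
      | l :: rest =>
        have hr : rest.length ≤ n := Nat.le_of_succ_le_succ hl
        rcases classifyB_cases l with h | h | h | h
        · -- TOC header: index i is covered by the new span
          have hcov : i < (scanB (i + 1) (rest.map classifyB)).1 :=
            Nat.lt_of_lt_of_le (Nat.lt_succ_self i) (scanB_ge _ _)
          simp only [List.map_cons, h]
          simp [spansB, filterB, specOuter, hcov, h]
          exact ih.2 rest hr i (i + 1) (Nat.le_succ _)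
        all_goals
          -- not a TOC header: no span covers i, line kept
          have hne0 : ¬(classifyB l == 0) = true := by simp [h]
          simp only [List.map_cons, specOuter, spansB]
          rw [if_neg hne0]
          simp only [filterB]
          rw [any_cov_false (fun p hp => Nat.lt_of_succ_le (spansB_lb hp)),
              if_neg Bool.false_ne_true, ih.1 rest hr (i + 1), if_neg hne0]
    · -- inner scan: indices up to the boundary are covered by the head span
      intro lines hl a j ha
      match lines with
      | [] => simp [filterB, specInner]
      | l :: rest =>
        have hr : rest.length ≤ n := Nat.le_of_succ_le_succ hl
        have hcv : (decide (a ≤ j ∧ j < (scanB (j + 1) (rest.map classifyB)).1)) = true := by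
          have := Nat.lt_of_lt_of_le (Nat.lt_succ_self j) (scanB_ge (rest.map classifyB) (j + 1))
          simp only [decide_eq_true_eq]; exact ⟨ha, this⟩
        rcases classifyB_cases l with h | h | h | h
        · -- nested TOC header: stays inside the span
          have hne1 : ¬(classifyB l == 1) = true := by simp [h]
          have hne2 : ¬(classifyB l == 2) = true := by simp [h]
          have heq0 : (classifyB l == 0) = true := by simp [h]
          simp only [List.map_cons, scanB, specInner]
          rw [if_neg hne1, if_neg hne2, if_pos heq0]
          simp only [filterB, List.any_cons, hcv, Bool.true_or]
          rw [if_pos trivial]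
          exact ih.2 rest hr a (j + 1) (Nat.le_trans ha (Nat.le_succ _))
        · -- heading boundary: span ends at j, line kept, outer resumes
          have hne0 : ¬(classifyB l == 0) = true := by simp [h]
          have heq1 : (classifyB l == 1) = true := by simp [h]
          simp only [List.map_cons, scanB, specInner]
          rw [if_pos heq1, if_neg hne0]
          simp only [spansB]
          rw [if_neg hne0]
          have hd : (decide (a ≤ j ∧ j < j)) = false := by simp
          simp only [filterB, List.any_cons, hd, Bool.false_or]
          rw [any_cov_false (fun p hp => Nat.lt_of_succ_le (spansB_lb hp)),
              if_neg Bool.false_ne_true,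
              filterB_dead rest (spansB (j + 1) (rest.map classifyB)) a j (j + 1) (Nat.le_succ _),
              ih.1 rest hr (j + 1), if_pos heq1]
        · -- '---' boundary: index j covered, span ends at j + 1, outer resumes
          have hne0 : ¬(classifyB l == 0) = true := by simp [h]
          have hne1 : ¬(classifyB l == 1) = true := by simp [h]
          have heq2 : (classifyB l == 2) = true := by simp [h]
          have hcv2 : (decide (a ≤ j ∧ j < j + 1)) = true := by
            simp only [decide_eq_true_eq]; exact ⟨ha, Nat.lt_succ_self j⟩
          simp only [List.map_cons, scanB, specInner]
          rw [if_neg hne1, if_pos heq2, if_neg hne0]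
          simp only [filterB, List.any_cons, hcv2, Bool.true_or]
          rw [if_pos trivial,
              filterB_dead rest (spansB (j + 1) (rest.map classifyB)) a (j + 1) (j + 1)
                (Nat.le_refl _),
              ih.1 rest hr (j + 1), if_neg hne1, if_pos heq2]
        · -- ordinary line: covered, stay inside
          have hne0 : ¬(classifyB l == 0) = true := by simp [h]
          have hne1 : ¬(classifyB l == 1) = true := by simp [h]
          have hne2 : ¬(classifyB l == 2) = true := by simp [h]
          simp only [List.map_cons, scanB, specInner]
          rw [if_neg hne1, if_neg hne2, if_neg hne0]
          simp only [filterB, List.any_cons, hcv, Bool.true_or]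
          rw [if_pos trivial, if_neg hne1, if_neg hne2]
          exact ih.2 rest hr a (j + 1) (Nat.le_trans ha (Nat.le_succ _))

-- ===== VERDICT (by name: the statement is the Claim_ definition above) =====
theorem strip_existing_toc_spec : Claim_equal_strip_existing_toc := by
  intro md _
  show _ = _
  simp only [strip_existing_toc, strip_existing_toc_alt]
  rw [(foldA_eq_spec (PySem.Chars.splitOn md.toList ['\n']) []).1,
      (mainB_aux (PySem.Chars.splitOn md.toList ['\n']).length).1 _ (Nat.le_refl _) 0]
  rfl
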